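-- pv_equiv track=rewrite | github.com/koreabeginner96/CordingTest | 2023_04_07/pro_1_Hall_Of_Frame.py | solution
-- ===== SOURCE A (Python) =====
-- def solution(k, score):
--     temp=[]
--     answer = []
--     for i in range(len(score)):
--         if i<k:
--             temp.append(score[i])
--             temp.sort()
--             answer.append(temp[0])
--         else:
--             temp.append(score[i])
--             temp.sort()
--             temp=temp[-k:]
--             answer.append(temp[0])
--     return answer
-- ===== SOURCE B (Python) =====
-- def solution(k, score):
--     # Maintain an ascending window of the current top-k scores: binary-search the
--     # insertion point, insert, and drop the smallest when over capacity.
--     window = []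
--     answer = []
--     for x in score:
--         lo, hi = 0, len(window)
--         while lo < hi:
--             mid = (lo + hi) // 2
--             if window[mid] <= x:
--                 lo = mid + 1
--             else:
--                 hi = mid
--         window.insert(lo, x)
--         if len(window) > k:
--             window.pop(0)
--         answer.append(window[0])
--     return answer
-- ===== Notes on version B (the rewrite author's own statement) =====
-- stated objective: faster
-- what changed: B maintains the top-k window incrementally: a hand-written binary search finds the insertion point and the smallest element is popped when over capacity, instead of A's per-step append + full sort + negative-slice copy with an index branch.
-- outside the precondition, e.g. on solution(0, [1]): A returns [1], B raises IndexError; on solution(0, [5, 2]): A returns [5, 2], B raises IndexError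
import Mathlib
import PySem

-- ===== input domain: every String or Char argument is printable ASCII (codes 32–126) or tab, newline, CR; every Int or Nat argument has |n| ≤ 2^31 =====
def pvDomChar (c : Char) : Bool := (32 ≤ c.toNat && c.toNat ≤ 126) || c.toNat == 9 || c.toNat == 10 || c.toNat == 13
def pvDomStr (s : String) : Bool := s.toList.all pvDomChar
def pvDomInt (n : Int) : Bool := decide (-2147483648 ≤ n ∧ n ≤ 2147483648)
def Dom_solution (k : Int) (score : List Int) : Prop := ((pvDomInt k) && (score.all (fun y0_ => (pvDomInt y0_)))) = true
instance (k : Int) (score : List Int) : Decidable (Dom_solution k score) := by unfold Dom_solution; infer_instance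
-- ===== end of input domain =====

-- B maintains the top-k window incrementally (binary-search insert, pop front when over
-- capacity) instead of A's per-step append + full sort + negative slice with an index branch.

-- ===== PORT A =====
-- for i in range(len(score)): temp.append(score[i]); temp.sort(); (if i >= k: temp = temp[-k:]); answer.append(temp[0])
-- temp[0] is ported as headD 0: inside Pre_solution the window is never empty, so Python never raises there.
def solution (k : Int) (score : List Int) : List Int :=
  ((PySem.List.pyRange 0 (PySem.List.len score) 1).foldl
    (fun (st : List Int × List Int) i =>
      if i < k then
        let temp := PySem.List.sorted (st.1 ++ [PySem.List.pyGetD score i 0]) (fun x => x) false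
        (temp, st.2 ++ [temp.headD 0])
      else
        let temp := PySem.List.sorted (st.1 ++ [PySem.List.pyGetD score i 0]) (fun x => x) false
        let temp := PySem.List.slice temp (some (-k)) none
        (temp, st.2 ++ [temp.headD 0]))
    ([], [])).2

-- ===== PORT B =====
-- the hand-written loop `while lo < hi: mid = (lo+hi)//2; if window[mid] <= x: lo = mid+1 else: hi = mid`
-- (window[mid] is in range whenever 0 ≤ lo < hi ≤ len window, as in B's calls; pyGetD is its total form)
def bsearchAux (w : List Int) (x : Int) : Nat → Int → Int → Int
  | 0, lo, _ => lo
  | n + 1, lo, hi =>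
    if lo < hi then
      if PySem.List.pyGetD w (PySem.Int.floordiv (lo + hi) 2) 0 ≤ x then
        bsearchAux w x n (PySem.Int.floordiv (lo + hi) 2 + 1) hi
      else
        bsearchAux w x n lo (PySem.Int.floordiv (lo + hi) 2)
    else lo

-- fuel (hi - lo).toNat makes the loop structural; it never runs out (the range shrinks each step)
def bsearch (w : List Int) (x : Int) (lo hi : Int) : Int :=
  bsearchAux w x (hi - lo).toNat lo hi

def solution_alt (k : Int) (score : List Int) : List Int :=
  (score.foldl
    (fun (st : List Int × List Int) x =>
      let lo := bsearch st.1 x 0 (PySem.List.len st.1)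
      let w := PySem.List.insert st.1 lo x                   -- window.insert(lo, x)
      let w := if k < PySem.List.len w then w.tail else w    -- if len(window) > k: window.pop(0)
      (w, st.2 ++ [w.headD 0]))   -- answer.append(window[0]); window[0] as headD 0, never empty under Pre_
    ([], [])).2

-- ===== PRECONDITION & SPEC =====
-- Pre_ excludes k ≤ 0 with nonempty score: there A raises IndexError for k < 0, and for k = 0
-- returns a running minimum of all scores (temp[-0:] keeps everything) where B's window algorithm
-- itself raises IndexError on window[0] after popping its only element.
def Pre_solution (k : Int) (score : List Int) : Prop := 1 ≤ k ∨ score = []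
instance (k : Int) (score : List Int) : Decidable (Pre_solution k score) := by unfold Pre_solution; infer_instance
def pvWitness_solution : Int × List Int := (2, [5, 1, 4, 4, 2])
def Spec_solution (k : Int) (score : List Int) (out : List Int) : Prop := out = solution_alt k score
instance (k : Int) (score : List Int) (out : List Int) : Decidable (Spec_solution k score out) := by unfold Spec_solution; infer_instance

-- ===== CLAIM (what is proved, stated in full; the proofs are below) =====
def Claim_equal_solution : Prop := ∀ (k : Int) (score : List Int), Dom_solution k score → Pre_solution k score → Spec_solution k score (solution k score)

-- ===== LEMMAS AND PROOFS =====

-- proof-side model of one window update: insert x after every element ≤ x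
def insertLE (x : Int) : List Int → List Int
  | [] => [x]
  | y :: ys => if y ≤ x then y :: insertLE x ys else x :: y :: ys

theorem insertLE_perm (x : Int) (l : List Int) : (insertLE x l).Perm (x :: l) := by
  induction l with
  | nil => simp [insertLE]
  | cons y ys ih =>
    simp only [insertLE]
    split
    · exact (ih.cons y).trans (List.Perm.swap x y ys)
    · exact List.Perm.refl _

theorem insertLE_pairwise (x : Int) (l : List Int) (h : l.Pairwise (· ≤ ·)) :
    (insertLE x l).Pairwise (· ≤ ·) := by
  induction l with
  | nil => simp [insertLE]
  | cons y ys ih =>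
    simp only [insertLE]
    rcases List.pairwise_cons.mp h with ⟨hy, hys⟩
    split
    · rename_i hyx
      refine List.pairwise_cons.mpr ⟨?_, ih hys⟩
      intro z hz
      rcases List.mem_cons.mp ((insertLE_perm x ys).mem_iff.mp hz) with rfl | hz
      · exact hyx
      · exact hy z hz
    · rename_i hyx
      refine List.pairwise_cons.mpr ⟨?_, h⟩
      intro z hz
      rcases List.mem_cons.mp hz with rfl | hz
      · omega
      · exact le_trans (by omega) (hy z hz)

-- A's per-step sort of a sorted window plus one appended element IS the ordered insertion
theorem sorted_append_singleton (x : Int) (l : List Int) (h : l.Pairwise (· ≤ ·)) :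
    PySem.List.sorted (l ++ [x]) (fun x => x) false = insertLE x l := by
  refine PySem.List.sorted_id_eq_of_perm_of_pairwise (l ++ [x]) (insertLE x l) ?_ (insertLE_pairwise x l h)
  exact (insertLE_perm x l).trans (List.perm_append_comm (l₁ := [x]) (l₂ := l))

theorem length_insertLE (x : Int) (l : List Int) : (insertLE x l).length = l.length + 1 :=
  (insertLE_perm x l).length_eq

theorem sorted_getD_mono (w : List Int) (hsort : w.Pairwise (· ≤ ·)) (i j : Nat)
    (hij : i ≤ j) (hj : j < w.length) : w.getD i 0 ≤ w.getD j 0 := by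
  rcases eq_or_lt_of_le hij with rfl | hlt
  · exact le_refl _
  · rw [List.getD_eq_getElem w 0 (by omega), List.getD_eq_getElem w 0 hj]
    exact List.pairwise_iff_getElem.mp hsort i j (by omega) hj hlt

-- the binary search returns the split point of the sorted window around x
theorem bsearch_spec (w : List Int) (x : Int) (hsort : w.Pairwise (· ≤ ·)) :
    ∀ (n : Nat) (lo hi : Int), (hi - lo).toNat ≤ n → 0 ≤ lo → lo ≤ hi → hi ≤ (w.length : Int) →
      (∀ j : Nat, j < lo.toNat → w.getD j 0 ≤ x) →
      (∀ j : Nat, hi.toNat ≤ j → j < w.length → x < w.getD j 0) →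
      0 ≤ bsearchAux w x n lo hi ∧ bsearchAux w x n lo hi ≤ (w.length : Int) ∧
      (∀ j : Nat, j < (bsearchAux w x n lo hi).toNat → w.getD j 0 ≤ x) ∧
      (∀ j : Nat, (bsearchAux w x n lo hi).toNat ≤ j → j < w.length → x < w.getD j 0) := by
  intro n
  induction n with
  | zero =>
    intro lo hi hfuel h0 hlh hhi hlow hhigh
    simp only [bsearchAux]
    exact ⟨h0, by omega, hlow, fun j hj hjl => hhigh j (by omega) hjl⟩
  | succ n ih =>
    intro lo hi hfuel h0 hlh hhi hlow hhigh
    simp only [bsearchAux]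
    by_cases h : lo < hi
    · rw [if_pos h]
      have hb := PySem.Int.floordiv_two_mid_bounds (le_of_lt h)
      have hlt : PySem.Int.floordiv (lo + hi) 2 < hi := by
        rw [PySem.Int.floordiv_lt_iff_lt_mul (by omega)]; omega
      set mid := PySem.Int.floordiv (lo + hi) 2 with hmid
      have hmidlen : mid < (w.length : Int) := by omega
      have hget : PySem.List.pyGetD w mid 0 = w.getD mid.toNat 0 := by
        rw [PySem.List.pyGetD_eq_getElem w 0 (by omega) (by simpa using hmidlen)]
        rw [List.getD_eq_getElem w 0 (by omega)]
      by_cases hcmp : PySem.List.pyGetD w mid 0 ≤ x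
      · rw [if_pos hcmp]
        refine ih (mid + 1) hi (by omega) (by omega) (by omega) hhi ?_ hhigh
        intro j hj
        have hjm : j ≤ mid.toNat := by omega
        exact le_trans (sorted_getD_mono w hsort j mid.toNat hjm (by omega)) (hget ▸ hcmp)
      · rw [if_neg hcmp]
        refine ih lo mid (by omega) h0 (by omega) (by omega) hlow ?_
        intro j hjm hjl
        have := sorted_getD_mono w hsort mid.toNat j hjm hjl
        omega
    · rw [if_neg h]
      exact ⟨h0, by omega, hlow, fun j hj hjl => hhigh j (by omega) hjl⟩

-- inserting at the split point is the ordered insertion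
theorem take_cons_drop_eq_insertLE (x : Int) :
    ∀ (w : List Int) (r : Nat), r ≤ w.length →
      (∀ j : Nat, j < r → w.getD j 0 ≤ x) →
      (∀ j : Nat, r ≤ j → j < w.length → x < w.getD j 0) →
      w.take r ++ x :: w.drop r = insertLE x w := by
  intro w
  induction w with
  | nil =>
    intro r hr _ _
    have : r = 0 := by simpa using hr
    subst this; simp [insertLE]
  | cons y ys ih =>
    intro r hr hlow hhigh
    cases r with
    | zero =>
      have hxy : x < y := by simpa using hhigh 0 (by omega) (by simp)
      simp [insertLE, show ¬ y ≤ x by omega]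
    | succ s =>
      have hyx : y ≤ x := by simpa using hlow 0 (by omega)
      simp only [List.take_succ_cons, List.drop_succ_cons, List.cons_append, insertLE, if_pos hyx]
      congr 1
      refine ih s (by simpa using hr) ?_ ?_
      · intro j hj; simpa using hlow (j + 1) (by omega)
      · intro j hj hjl
        have := hhigh (j + 1) (by omega) (by simpa using hjl)
        simpa using this

theorem insert_bsearch_eq_insertLE (w : List Int) (x : Int) (hsort : w.Pairwise (· ≤ ·)) :
    PySem.List.insert w (bsearch w x 0 (PySem.List.len w)) x = insertLE x w := by
  rw [bsearch]
  have hspec := bsearch_spec w x hsort (PySem.List.len w - 0).toNat 0 (PySem.List.len w)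
    le_rfl le_rfl (by simp [PySem.List.len_eq]) (by simp [PySem.List.len_eq])
    (by omega) (by intro j hj hjl; simp [PySem.List.len_eq] at hj; omega)
  obtain ⟨h0, hle, hlow, hhigh⟩ := hspec
  set r := bsearchAux w x (PySem.List.len w - 0).toNat 0 (PySem.List.len w) with hr
  have hcast : r = ((r.toNat : Nat) : Int) := by omega
  rw [hcast, PySem.List.insert_natCast w r.toNat x (by omega)]
  exact take_cons_drop_eq_insertLE x w r.toNat (by omega) hlow hhigh

-- loop invariant: from a sorted window whose size is min s k, A's and B's loop bodies keep
-- identical states, so the remaining iterations produce the same (window, answer) pair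
theorem loop_eq (k : Int) (hk : 1 ≤ k) (xs : List Int) :
    ∀ (s : Int) (temp ans : List Int), 0 ≤ s → temp.Pairwise (· ≤ ·) →
      (temp.length : Int) = min s k →
    ((PySem.List.enumerate xs s).foldl
      (fun (st : List Int × List Int) p =>
        if p.1 < k then
          let t := PySem.List.sorted (st.1 ++ [p.2]) (fun x => x) false
          (t, st.2 ++ [t.headD 0])
        else
          let t := PySem.List.sorted (st.1 ++ [p.2]) (fun x => x) false
          let t := PySem.List.slice t (some (-k)) none
          (t, st.2 ++ [t.headD 0])) (temp, ans)) =
    (xs.foldl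
      (fun (st : List Int × List Int) x =>
        let lo := bsearch st.1 x 0 (PySem.List.len st.1)
        let w := PySem.List.insert st.1 lo x
        let w := if k < PySem.List.len w then w.tail else w
        (w, st.2 ++ [w.headD 0])) (temp, ans)) := by
  induction xs with
  | nil => intro s temp ans _ _ _; simp [PySem.List.enumerate_nil]
  | cons x xs ih =>
    intro s temp ans hs hsort hlen
    rw [PySem.List.enumerate_cons]
    simp only [List.foldl_cons]
    rw [sorted_append_singleton x temp hsort, insert_bsearch_eq_insertLE temp x hsort]
    have hlenI : (insertLE x temp).length = temp.length + 1 := length_insertLE x temp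
    by_cases hsk : s < k
    · -- window not yet full: no trim on either side
      have hB : ¬ k < PySem.List.len (insertLE x temp) := by
        simp only [PySem.List.len_eq, hlenI]; push_cast; omega
      rw [if_pos hsk, if_neg hB]
      exact ih (s + 1) _ _ (by omega) (insertLE_pairwise x temp hsort)
        (by push_cast [hlenI]; omega)
    · -- window full (length k): A slices [-k:], B pops the front — both drop the head
      have hB : k < PySem.List.len (insertLE x temp) := by
        simp only [PySem.List.len_eq, hlenI]; push_cast; omega
      have hkNat : 0 < k.toNat := by omega
      have hcast : -((k.toNat : Nat) : Int) = -k := by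
        simp [Int.toNat_of_nonneg (by omega : (0:Int) ≤ k)]
      have hslice : PySem.List.slice (insertLE x temp) (some (-k)) none = (insertLE x temp).tail := by
        rw [← hcast, PySem.List.slice_from_neg_natCast _ _ hkNat]
        have : (insertLE x temp).length - k.toNat = 1 := by omega
        rw [this, List.drop_one]
      rw [if_neg hsk, if_pos hB, hslice]
      exact ih (s + 1) _ _ (by omega)
        ((insertLE_pairwise x temp hsort).sublist (List.tail_sublist _))
        (by
          have : (insertLE x temp).tail.length = k.toNat := by
            simp [hlenI]; omega
          rw [this]; omega)

-- ===== VERDICT (by name: the statement is the Claim_ definition above) =====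
theorem solution_spec : Claim_equal_solution := by
  intro k score _ hpre
  unfold Spec_solution
  rcases hpre with hk | rfl
  · unfold solution solution_alt
    have henum := PySem.List.enumerate_eq_map_pyRange (xs := score) (d := 0)
    have := loop_eq k hk score 0 [] [] le_rfl List.Pairwise.nil (by simp; omega)
    rw [henum, List.foldl_map] at this
    simp only at this
    rw [← this]
  · simp [solution, solution_alt, PySem.List.len_eq, PySem.List.pyRange_one_eq_nil]
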